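-- pv_equiv track=rewrite | github.com/shikgom2/boj | 13993.py | solve
-- ===== SOURCE A (Python) =====
-- def solve(n, m, a, b):
--     c = [(b[i], i) for i in range(m)]
--     sum_values = 0
--     t = []
--
--     for i in range(n):
--         sum_values += a[i][1]
--         t.append((a[i][0], sum_values))
--
--     c.sort(reverse=True)
--     ans = [0] * m
--     w = [(0, 0)] * m
--
--     for i in range(n - 1):
--         left, right = -1, m
--         while left + 1 < right:
--             middle = (left + right) // 2
--             if t[i][1] + c[middle][0] < 0:
--                 right = middle
--             else:
--                 left = middle
--
--         if right < m:
--             dt = t[i + 1][0] - t[i][0]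
--             w[right] = (w[right][0] - (t[i][1] + c[right][0]) * dt, w[right][1] + dt)
--
--     for i in range(m):
--         if i > 0:
--             w[i] = (w[i][0] + (c[i - 1][0] - c[i][0]) * w[i - 1][1] + w[i - 1][0], w[i][1] + w[i - 1][1])
--
--         ans[c[i][1]] = -1 if -sum_values > c[i][0] else w[i][0]
--
--     return ans
-- ===== SOURCE B (Python) =====
-- def solve(n, m, a, b):
--     c = sorted(((b[i], i) for i in range(m)), reverse=True)
--     s = 0
--     t = []
--     for i in range(n):
--         s += a[i][1]
--         t.append((a[i][0], s))
--     neg = [0] * m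
--     cnt = [0] * m
--     for i in range(n - 1):
--         r = sum(1 for v, _ in c if t[i][1] + v >= 0)
--         if r < m:
--             dt = t[i + 1][0] - t[i][0]
--             neg[r] -= (t[i][1] + c[r][0]) * dt
--             cnt[r] += dt
--     ans = [0] * m
--     accv = 0
--     acct = 0
--     prev = 0
--     for i, (v, idx) in enumerate(c):
--         if i > 0:
--             accv += (prev - v) * acct
--         accv += neg[i]
--         acct += cnt[i]
--         ans[idx] = -1 if -s > v else accv
--         prev = v
--     return ans
-- ===== Notes on version B (the rewrite author's own statement) =====
-- stated objective: alternative
-- what changed: Each of A's n-1 binary searches over the sorted list is replaced by a direct counting scan (count of entries with t[i][1]+value >= 0), and A's in-place pair array w with its mutating prefix pass is replaced by two separate bucket arrays (neg, cnt) combined by running accumulators in a single enumerate pass.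
import Mathlib
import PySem

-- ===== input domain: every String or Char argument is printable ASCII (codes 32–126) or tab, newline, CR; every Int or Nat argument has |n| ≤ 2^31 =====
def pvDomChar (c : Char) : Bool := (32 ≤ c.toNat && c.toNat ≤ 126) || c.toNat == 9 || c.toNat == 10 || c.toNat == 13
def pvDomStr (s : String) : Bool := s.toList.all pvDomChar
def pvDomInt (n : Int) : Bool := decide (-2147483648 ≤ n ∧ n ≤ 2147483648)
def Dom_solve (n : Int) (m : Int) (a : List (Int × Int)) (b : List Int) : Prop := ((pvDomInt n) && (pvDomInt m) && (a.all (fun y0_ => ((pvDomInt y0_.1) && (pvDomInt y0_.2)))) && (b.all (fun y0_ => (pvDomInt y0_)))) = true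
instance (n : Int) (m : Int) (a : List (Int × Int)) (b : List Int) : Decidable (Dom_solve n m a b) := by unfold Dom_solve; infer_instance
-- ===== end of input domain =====

-- B replaces A's per-i binary search by a single counting scan over the sorted list and
-- replaces the in-place pair array `w` by two bucket arrays folded with running accumulators
-- in the final pass (objective: alternative; return value only — neither port mutates).

-- ===== PORT A =====

-- A's inner while-loop binary search (left, right), literal: middle = (left+right)//2.
def solveBS (tv : Int) (c : List (Int × Int)) (left right : Int) : Int :=
  if _h : left + 1 < right then
    let middle := PySem.Int.floordiv (left + right) 2
    if tv + (PySem.List.pyGetD c middle (0, 0)).1 < 0 then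
      solveBS tv c left middle
    else
      solveBS tv c middle right
  else right
termination_by (right - left).toNat
decreasing_by
  all_goals
    simp only [middle, PySem.Int.floordiv_eq_ediv_of_pos (by norm_num : (0:Int) < 2)] at *
    omega

-- body of A's `for i in range(n-1)` loop
def bodyA (m : Int) (t c : List (Int × Int)) (w : List (Int × Int)) (i : Int) : List (Int × Int) :=
  let right := solveBS (PySem.List.pyGetD t i (0, 0)).2 c (-1) m
  if right < m then
    let dt := (PySem.List.pyGetD t (i + 1) (0, 0)).1 - (PySem.List.pyGetD t i (0, 0)).1
    let wr := PySem.List.pyGetD w right (0, 0)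
    PySem.List.pySetD w right
      (wr.1 - ((PySem.List.pyGetD t i (0, 0)).2 + (PySem.List.pyGetD c right (0, 0)).1) * dt,
       wr.2 + dt)
  else w

-- body of A's final `for i in range(m)` loop; state = (w, ans)
def finA (sumv : Int) (c : List (Int × Int)) (st : List (Int × Int) × List Int) (i : Int) :
    List (Int × Int) × List Int :=
  let w :=
    if 0 < i then
      let wi := PySem.List.pyGetD st.1 i (0, 0)
      let wim := PySem.List.pyGetD st.1 (i - 1) (0, 0)
      PySem.List.pySetD st.1 i
        (wi.1 + ((PySem.List.pyGetD c (i - 1) (0, 0)).1 - (PySem.List.pyGetD c i (0, 0)).1) * wim.2 + wim.1,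
         wi.2 + wim.2)
    else st.1
  let ci := PySem.List.pyGetD c i (0, 0)
  (w, PySem.List.pySetD st.2 ci.2
        (if -sumv > ci.1 then -1 else (PySem.List.pyGetD w i (0, 0)).1))

def solve (n : Int) (m : Int) (a : List (Int × Int)) (b : List Int) : List Int :=
  let c0 : List (Int × Int) := (PySem.List.pyRange 0 m 1).map (fun i => (PySem.List.pyGetD b i 0, i))
  let st := (PySem.List.pyRange 0 n 1).foldl
    (fun (st : Int × List (Int × Int)) i =>
      let sv := st.1 + (PySem.List.pyGetD a i (0, 0)).2
      (sv, st.2 ++ [((PySem.List.pyGetD a i (0, 0)).1, sv)]))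
    (0, [])
  let sumValues := st.1
  let t := st.2
  let c := PySem.List.sorted2 c0 (fun p => p.1) (fun p => p.2) true
  let ans0 : List Int := List.replicate m.toNat 0
  let w0 : List (Int × Int) := List.replicate m.toNat (0, 0)
  let w1 := (PySem.List.pyRange 0 (n - 1) 1).foldl (bodyA m t c) w0
  let fin := (PySem.List.pyRange 0 m 1).foldl (finA sumValues c) (w1, ans0)
  fin.2

-- ===== PORT B =====

-- body of B's bucket loop; state = (neg, cnt); r is a counting scan, not a search
def bodyB (m : Int) (t c : List (Int × Int)) (nc : List Int × List Int) (i : Int) :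
    List Int × List Int :=
  let r := c.foldl (fun acc p => if 0 ≤ (PySem.List.pyGetD t i (0, 0)).2 + p.1 then acc + 1 else acc) 0
  if r < m then
    let dt := (PySem.List.pyGetD t (i + 1) (0, 0)).1 - (PySem.List.pyGetD t i (0, 0)).1
    (PySem.List.pySetD nc.1 r
       (PySem.List.pyGetD nc.1 r 0 - ((PySem.List.pyGetD t i (0, 0)).2 + (PySem.List.pyGetD c r (0, 0)).1) * dt),
     PySem.List.pySetD nc.2 r (PySem.List.pyGetD nc.2 r 0 + dt))
  else nc

-- body of B's final enumerate loop; state = (accv, acct, prev, ans)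
def finB (s : Int) (neg cnt : List Int) (st : Int × Int × Int × List Int) (e : Int × Int × Int) :
    Int × Int × Int × List Int :=
  let i := e.1
  let v := e.2.1
  let accv := if 0 < i then st.1 + (st.2.2.1 - v) * st.2.1 else st.1
  let accv := accv + PySem.List.pyGetD neg i 0
  let acct := st.2.1 + PySem.List.pyGetD cnt i 0
  (accv, acct, v, PySem.List.pySetD st.2.2.2 e.2.2 (if -s > v then -1 else accv))

def solve_alt (n : Int) (m : Int) (a : List (Int × Int)) (b : List Int) : List Int :=
  let c := PySem.List.sorted2 ((PySem.List.pyRange 0 m 1).map (fun i => (PySem.List.pyGetD b i 0, i)))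
    (fun p => p.1) (fun p => p.2) true
  let st := (PySem.List.pyRange 0 n 1).foldl
    (fun (st : Int × List (Int × Int)) i =>
      let sv := st.1 + (PySem.List.pyGetD a i (0, 0)).2
      (sv, st.2 ++ [((PySem.List.pyGetD a i (0, 0)).1, sv)]))
    (0, [])
  let s := st.1
  let t := st.2
  let nc := (PySem.List.pyRange 0 (n - 1) 1).foldl (bodyB m t c)
    (List.replicate m.toNat 0, List.replicate m.toNat 0)
  let fin := (PySem.List.enumerate c 0).foldl (finB s nc.1 nc.2)
    (0, 0, 0, List.replicate m.toNat 0)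
  fin.2.2.2

-- ===== PRECONDITION & SPEC =====
-- Pre_ excludes exactly the inputs where A raises IndexError: n beyond len(a) or m beyond len(b).
def Pre_solve (n : Int) (m : Int) (a : List (Int × Int)) (b : List Int) : Prop :=
  n ≤ (a.length : Int) ∧ m ≤ (b.length : Int)
instance (n : Int) (m : Int) (a : List (Int × Int)) (b : List Int) : Decidable (Pre_solve n m a b) := by unfold Pre_solve; infer_instance
def pvWitness_solve : Int × Int × (List (Int × Int)) × List Int := (2, 2, [(0, 1), (3, -2)], [1, -1])

def Spec_solve (n : Int) (m : Int) (a : List (Int × Int)) (b : List Int) (out : List Int) : Prop := out = solve_alt n m a b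
instance (n : Int) (m : Int) (a : List (Int × Int)) (b : List Int) (out : List Int) : Decidable (Spec_solve n m a b out) := by unfold Spec_solve; infer_instance

-- ===== CLAIM (what is proved, stated in full; the proofs are below) =====
def Claim_equal_solve : Prop := ∀ (n : Int) (m : Int) (a : List (Int × Int)) (b : List Int), Dom_solve n m a b → Pre_solve n m a b → Spec_solve n m a b (solve n m a b)

-- ===== LEMMAS AND PROOFS =====

-- descending lexicographic "comes strictly before" test of A's reverse sort
def lexBefore (x y : Int × Int) : Bool :=
  decide (y.1 < x.1) || (!decide (x.1 < y.1) && decide (y.2 < x.2))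

theorem sorted2_rev_eq_foldl (xs : List (Int × Int)) :
    PySem.List.sorted2 xs (fun p => p.1) (fun p => p.2) true
      = xs.foldl (fun acc x => PySem.List.insertBy lexBefore x acc) [] := rfl

theorem lexBefore_trans {x y z : Int × Int} (h1 : lexBefore x y = true)
    (h2 : lexBefore y z = true) : lexBefore x z = true := by
  obtain ⟨x1, x2⟩ := x; obtain ⟨y1, y2⟩ := y; obtain ⟨z1, z2⟩ := z
  simp only [lexBefore, Bool.or_eq_true, Bool.and_eq_true, Bool.not_eq_true',
    decide_eq_true_eq, decide_eq_false_iff_not] at *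
  omega

theorem lexBefore_asymm {x y : Int × Int} (h : lexBefore x y = true) :
    lexBefore y x = false := by
  obtain ⟨x1, x2⟩ := x; obtain ⟨y1, y2⟩ := y
  simp only [lexBefore] at h ⊢
  simp at h ⊢
  omega

theorem pairwise_insertBy_lex (x : Int × Int) (ys : List (Int × Int))
    (h : ys.Pairwise (fun a b => lexBefore b a = false)) :
    (PySem.List.insertBy lexBefore x ys).Pairwise (fun a b => lexBefore b a = false) := by
  induction ys with
  | nil => simp [PySem.List.insertBy]
  | cons y ys ih =>
    rw [List.pairwise_cons] at h
    obtain ⟨hy, hys⟩ := h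
    by_cases hxy : lexBefore x y = true
    · have : PySem.List.insertBy lexBefore x (y :: ys) = x :: y :: ys := by
        simp [PySem.List.insertBy, hxy]
      rw [this]
      refine List.Pairwise.cons ?_ (List.Pairwise.cons hy hys)
      intro z hz
      rcases List.mem_cons.mp hz with rfl | hz
      · exact lexBefore_asymm hxy
      · -- lexBefore z x = false: else lexBefore z y via trans, contradicting hy z hz
        by_contra hzx
        have hzx' : lexBefore z x = true := by
          cases hlb : lexBefore z x with
          | false => exact absurd hlb hzx
          | true => rfl
        have := lexBefore_trans hzx' hxy
        rw [hy z hz] at this; exact Bool.false_ne_true this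
    · have hxy' : lexBefore x y = false := by
        cases hlb : lexBefore x y with
        | false => rfl
        | true => exact absurd hlb hxy
      have : PySem.List.insertBy lexBefore x (y :: ys)
          = y :: PySem.List.insertBy lexBefore x ys := by
        simp [PySem.List.insertBy, hxy']
      rw [this]
      refine List.Pairwise.cons ?_ (ih hys)
      intro z hz
      rcases (PySem.List.mem_insertBy lexBefore x z ys).mp hz with rfl | hz
      · exact hxy'
      · exact hy z hz

theorem sorted2_rev_pairwise_fst (xs : List (Int × Int)) :
    (PySem.List.sorted2 xs (fun p => p.1) (fun p => p.2) true).Pairwise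
      (fun p q : Int × Int => q.1 ≤ p.1) := by
  rw [sorted2_rev_eq_foldl]
  have key : ∀ (l : List (Int × Int)) (acc : List (Int × Int)),
      acc.Pairwise (fun a b => lexBefore b a = false) →
      (l.foldl (fun acc x => PySem.List.insertBy lexBefore x acc) acc).Pairwise
        (fun a b => lexBefore b a = false) := by
    intro l
    induction l with
    | nil => intro acc h; simpa using h
    | cons x l ih => intro acc h; exact ih _ (pairwise_insertBy_lex x acc h)
  have h := key xs [] (by simp)
  refine h.imp ?_
  intro p q hpq
  obtain ⟨p1, p2⟩ := p; obtain ⟨q1, q2⟩ := q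
  simp only [lexBefore] at hpq
  simp at hpq
  omega

-- number of entries of c with tv + value ≥ 0, as countP
theorem count_iff (tv : Int) (c : List (Int × Int))
    (hc : c.Pairwise (fun p q : Int × Int => q.1 ≤ p.1)) :
    ∀ (j : Nat) (hj : j < c.length),
      (0 ≤ tv + (getElem c j hj).1 ↔ (j : Int) < (c.countP (fun p => decide (0 ≤ tv + p.1)) : Int)) := by
  induction c with
  | nil => intro j hj; simp at hj
  | cons x xs ih =>
    rw [List.pairwise_cons] at hc
    obtain ⟨hx, hxs⟩ := hc
    intro j hj
    by_cases hpx : 0 ≤ tv + x.1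
    · have hcp : (x :: xs).countP (fun p => decide (0 ≤ tv + p.1))
          = xs.countP (fun p => decide (0 ≤ tv + p.1)) + 1 := by
        rw [List.countP_cons]; simp [hpx]
      rw [hcp]
      cases j with
      | zero =>
        try simp only [List.getElem_cons_zero]
        refine ⟨fun _ => by push_cast; omega, fun _ => hpx⟩
      | succ j =>
        simp only [List.getElem_cons_succ]
        have hj' : j < xs.length := by simpa using hj
        have hI := ih hxs j hj'
        constructor
        · intro h; have := hI.mp h; omega
        · intro h; apply hI.mpr; omega
    · have hall : xs.countP (fun p => decide (0 ≤ tv + p.1)) = 0 := by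
        rw [List.countP_eq_zero]
        intro q hq
        have := hx q hq
        simp only [decide_eq_true_eq]
        omega
      have hcp : (x :: xs).countP (fun p => decide (0 ≤ tv + p.1)) = 0 := by
        rw [List.countP_cons]; simp [hpx, hall]
      rw [hcp]
      cases j with
      | zero =>
        try simp only [List.getElem_cons_zero]
        exact ⟨fun h => absurd h hpx, fun h => by omega⟩
      | succ j =>
        simp only [List.getElem_cons_succ]
        have hj' : j < xs.length := by simpa using hj
        have hmem : xs[j] ∈ xs := List.getElem_mem hj'
        have := hx _ hmem
        exact ⟨fun h => by omega, fun h => by push_cast at h; omega⟩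

theorem solveBS_eq (tv : Int) (c : List (Int × Int))
    (hc : c.Pairwise (fun p q : Int × Int => q.1 ≤ p.1)) :
    ∀ (fuel : Nat) (l r : Int), (r - l).toNat ≤ fuel → -1 ≤ l → r ≤ (c.length : Int) →
      l < r → l < (c.countP (fun p => decide (0 ≤ tv + p.1)) : Int) →
      (c.countP (fun p => decide (0 ≤ tv + p.1)) : Int) ≤ r →
      solveBS tv c l r = (c.countP (fun p => decide (0 ≤ tv + p.1)) : Int) := by
  intro fuel
  induction fuel with
  | zero => intro l r hf _ _ hlr _ _; omega
  | succ fuel ih =>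
    intro l r hf hl hr hlr hlK hKr
    rw [solveBS.eq_def]
    by_cases hcond : l + 1 < r
    · rw [dif_pos hcond]
      show (if tv + (PySem.List.pyGetD c (PySem.Int.floordiv (l + r) 2) (0, 0)).1 < 0 then
              solveBS tv c l (PySem.Int.floordiv (l + r) 2)
            else solveBS tv c (PySem.Int.floordiv (l + r) 2) r)
          = ((c.countP (fun p => decide (0 ≤ tv + p.1)) : Int))
      have hdiv := PySem.Int.floordiv_eq_ediv_of_pos (a := l + r) (by norm_num : (0:Int) < 2)
      have hmb : l < PySem.Int.floordiv (l + r) 2 ∧ PySem.Int.floordiv (l + r) 2 < r := by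
        omega
      set mid := PySem.Int.floordiv (l + r) 2 with hmid
      have hmid0 : 0 ≤ mid := by omega
      have hmidlen : mid < (c.length : Int) := by omega
      have hmlt : mid.toNat < c.length := by omega
      have hget : PySem.List.pyGetD c mid (0, 0) = getElem c mid.toNat hmlt :=
        PySem.List.pyGetD_eq_getElem c (0, 0) hmid0 hmidlen
      have hcnt := count_iff tv c hc mid.toNat hmlt
      rw [Int.toNat_of_nonneg hmid0] at hcnt
      rw [hget]
      by_cases hb : tv + (getElem c mid.toNat hmlt).1 < 0
      · rw [if_pos hb]
        have hKm : (c.countP (fun p => decide (0 ≤ tv + p.1)) : Int) ≤ mid := by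
          by_contra hx
          exact absurd (hcnt.mpr (by omega)) (by omega)
        exact ih l mid (by omega) hl (by omega) (by omega) hlK hKm
      · rw [if_neg hb]
        have hmK : mid < (c.countP (fun p => decide (0 ≤ tv + p.1)) : Int) :=
          hcnt.mp (by omega)
        exact ih mid r (by omega) (by omega) hr (by omega) hmK hKr
    · rw [dif_neg hcond]
      omega

theorem pyGetD_map_fst (w : List (Int × Int)) (i : Int) :
    PySem.List.pyGetD (w.map Prod.fst) i 0 = (PySem.List.pyGetD w i (0, 0)).1 :=
  PySem.List.pyGetD_map Prod.fst w i (0, 0)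

theorem pyGetD_map_snd (w : List (Int × Int)) (i : Int) :
    PySem.List.pyGetD (w.map Prod.snd) i 0 = (PySem.List.pyGetD w i (0, 0)).2 :=
  PySem.List.pyGetD_map Prod.snd w i (0, 0)

theorem pySetD_map_fst (w : List (Int × Int)) {i : Int} (hi : 0 ≤ i) (x y : Int) :
    PySem.List.pySetD (w.map Prod.fst) i x = (PySem.List.pySetD w i (x, y)).map Prod.fst := by
  rw [PySem.List.pySetD_of_nonneg _ _ hi, PySem.List.pySetD_of_nonneg _ _ hi, List.map_set]

theorem pySetD_map_snd (w : List (Int × Int)) {i : Int} (hi : 0 ≤ i) (x y : Int) :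
    PySem.List.pySetD (w.map Prod.snd) i y = (PySem.List.pySetD w i (x, y)).map Prod.snd := by
  rw [PySem.List.pySetD_of_nonneg _ _ hi, PySem.List.pySetD_of_nonneg _ _ hi, List.map_set]

theorem bodyB_eq (m : Int) (t c : List (Int × Int))
    (hc : c.Pairwise (fun p q : Int × Int => q.1 ≤ p.1)) (hlen : c.length = m.toNat)
    (w : List (Int × Int)) (i : Int) :
    bodyB m t c (w.map Prod.fst, w.map Prod.snd) i
      = ((bodyA m t c w i).map Prod.fst, (bodyA m t c w i).map Prod.snd) := by
  unfold bodyA bodyB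
  have hcount : (c.foldl
      (fun acc p => if 0 ≤ (PySem.List.pyGetD t i (0, 0)).2 + p.1 then acc + 1 else acc) 0)
      = (c.countP (fun p => decide (0 ≤ (PySem.List.pyGetD t i (0, 0)).2 + p.1)) : Int) := by
    rw [PySem.List.foldl_ite_add_one]
    omega
  set tv := (PySem.List.pyGetD t i (0, 0)).2 with htv
  set K : Int := (c.countP (fun p => decide (0 ≤ tv + p.1)) : Int) with hK
  have hK0 : 0 ≤ K := by rw [hK]; positivity
  have hKlen : K ≤ (c.length : Int) := by
    rw [hK]
    exact_mod_cast List.countP_le_length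
  by_cases hm : 0 < m
  · have hbs : solveBS tv c (-1) m = K :=
      solveBS_eq tv c hc (m + 1).toNat (-1) m (by omega) (by omega)
        (by omega) (by omega) (by omega) (by omega)
    simp only [hcount, hbs]
    by_cases hKm : K < m
    · simp only [if_pos hKm, pyGetD_map_fst, pyGetD_map_snd, Prod.mk.injEq]
      refine ⟨?_, ?_⟩
      · rw [pySetD_map_fst w hK0 _ ((PySem.List.pyGetD w K (0,0)).2 + ((PySem.List.pyGetD t (i+1) (0,0)).1 - (PySem.List.pyGetD t i (0,0)).1))]
      · rw [pySetD_map_snd w hK0 ((PySem.List.pyGetD w K (0,0)).1 - (tv + (PySem.List.pyGetD c K (0,0)).1) * ((PySem.List.pyGetD t (i+1) (0,0)).1 - (PySem.List.pyGetD t i (0,0)).1)) _]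
    · simp only [if_neg hKm]
  · have hbs : solveBS tv c (-1) m = m := by
      rw [solveBS.eq_def, dif_neg (by omega : ¬ (-1:Int) + 1 < m)]
    simp only [hcount, hbs]
    rw [if_neg (by omega : ¬ m < m), if_neg (by omega : ¬ K < m)]

theorem bucket_eq (m : Int) (t c : List (Int × Int))
    (hc : c.Pairwise (fun p q : Int × Int => q.1 ≤ p.1)) (hlen : c.length = m.toNat) :
    ∀ (idxs : List Int) (w : List (Int × Int)),
      idxs.foldl (bodyB m t c) (w.map Prod.fst, w.map Prod.snd)
        = ((idxs.foldl (bodyA m t c) w).map Prod.fst,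
           (idxs.foldl (bodyA m t c) w).map Prod.snd) := by
  intro idxs
  induction idxs with
  | nil => intro w; rfl
  | cons i idxs ih =>
    intro w
    simp only [List.foldl_cons]
    rw [bodyB_eq m t c hc hlen w i, ih (bodyA m t c w i)]

theorem bodyA_length (m : Int) (t c : List (Int × Int)) (w : List (Int × Int)) (i : Int) :
    (bodyA m t c w i).length = w.length := by
  unfold bodyA
  by_cases h : solveBS (PySem.List.pyGetD t i (0, 0)).2 c (-1) m < m
  · simp only [if_pos h, PySem.List.length_pySetD]
  · simp only [if_neg h]

theorem foldl_bodyA_length (m : Int) (t c : List (Int × Int)) :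
    ∀ (idxs : List Int) (w : List (Int × Int)),
      (idxs.foldl (bodyA m t c) w).length = w.length := by
  intro idxs
  induction idxs with
  | nil => intro w; rfl
  | cons i idxs ih => intro w; rw [List.foldl_cons, ih, bodyA_length]

theorem getD_set_self (l : List (Int × Int)) (i : Nat) (h : i < l.length) (v d : Int × Int) :
    (l.set i v).getD i d = v := by simp [List.getD, h]

theorem getD_set_ne (l : List (Int × Int)) {i j : Nat} (h : i ≠ j) (v d : Int × Int) :
    (l.set i v).getD j d = l.getD j d := by simp [List.getD, h]

def stepA (sumv : Int) (c : List (Int × Int)) (st : List (Int × Int) × List Int) (k : Nat) :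
    List (Int × Int) × List Int := finA sumv c st (k : Int)

def stepB (sumv : Int) (neg cnt : List Int) (c : List (Int × Int))
    (st : Int × Int × Int × List Int) (k : Nat) : Int × Int × Int × List Int :=
  finB sumv neg cnt st ((k : Int), PySem.List.pyGetD c (k : Int) (0, 0))

def AFold (sumv : Int) (c w1 : List (Int × Int)) (ans0 : List Int) (i : Nat) :
    List (Int × Int) × List Int := (List.range i).foldl (stepA sumv c) (w1, ans0)

def BFold (sumv : Int) (c w1 : List (Int × Int)) (ans0 : List Int) (i : Nat) :
    Int × Int × Int × List Int :=
  (List.range i).foldl (stepB sumv (w1.map Prod.fst) (w1.map Prod.snd) c) (0, 0, 0, ans0)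

theorem final_inv (sumv : Int) (c w1 : List (Int × Int)) (ans0 : List Int)
    (hw : w1.length = c.length) :
    ∀ i : Nat, i ≤ c.length →
      (AFold sumv c w1 ans0 i).2 = (BFold sumv c w1 ans0 i).2.2.2 ∧
      (AFold sumv c w1 ans0 i).1.length = c.length ∧
      (∀ j : Nat, i ≤ j →
        (AFold sumv c w1 ans0 i).1.getD j (0, 0) = w1.getD j (0, 0)) ∧
      (i = 0 → (BFold sumv c w1 ans0 i).1 = 0 ∧ (BFold sumv c w1 ans0 i).2.1 = 0) ∧
      (0 < i →
        (BFold sumv c w1 ans0 i).1 = ((AFold sumv c w1 ans0 i).1.getD (i - 1) (0, 0)).1 ∧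
        (BFold sumv c w1 ans0 i).2.1 = ((AFold sumv c w1 ans0 i).1.getD (i - 1) (0, 0)).2 ∧
        (BFold sumv c w1 ans0 i).2.2.1 = (c.getD (i - 1) (0, 0)).1) := by
  intro i
  induction i with
  | zero =>
    intro _
    exact ⟨rfl, hw, fun j _ => rfl, fun _ => ⟨rfl, rfl⟩, fun h => absurd h (lt_irrefl 0)⟩
  | succ i ih =>
    intro hi1
    have hiN : i < c.length := hi1
    obtain ⟨h1, h2, h3, h40, h5⟩ := ih (Nat.le_of_lt hiN)
    have hrecA : AFold sumv c w1 ans0 (i + 1) = stepA sumv c (AFold sumv c w1 ans0 i) i := by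
      unfold AFold; rw [List.range_succ, List.foldl_append, List.foldl_cons, List.foldl_nil]
    have hrecB : BFold sumv c w1 ans0 (i + 1)
        = stepB sumv (w1.map Prod.fst) (w1.map Prod.snd) c (BFold sumv c w1 ans0 i) i := by
      unfold BFold; rw [List.range_succ, List.foldl_append, List.foldl_cons, List.foldl_nil]
    set A := AFold sumv c w1 ans0 i with hA
    set B := BFold sumv c w1 ans0 i with hB
    rw [hrecA, hrecB]
    have hci : PySem.List.pyGetD c (i : Int) (0, 0) = c.getD i (0, 0) :=
      PySem.List.pyGetD_natCast c i (0, 0)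
    have hgetA : PySem.List.pyGetD A.1 (i : Int) (0, 0) = w1.getD i (0, 0) := by
      rw [PySem.List.pyGetD_natCast]; exact h3 i (le_refl i)
    have hnegi : PySem.List.pyGetD (w1.map Prod.fst) (i : Int) 0 = (w1.getD i (0, 0)).1 := by
      rw [pyGetD_map_fst, PySem.List.pyGetD_natCast]
    have hcnti : PySem.List.pyGetD (w1.map Prod.snd) (i : Int) 0 = (w1.getD i (0, 0)).2 := by
      rw [pyGetD_map_snd, PySem.List.pyGetD_natCast]
    have hilen : i < A.1.length := by rw [h2]; exact hiN
    by_cases hi0 : i = 0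
    · subst hi0
      obtain ⟨hB1, hB2⟩ := h40 rfl
      have hA0 : A.1.getD 0 (0, 0) = w1.getD 0 (0, 0) := by
        rw [← PySem.List.pyGetD_natCast]; exact hgetA
      unfold stepA stepB finA finB
      have hcond : ¬ (0 : Int) < ((0 : Nat) : Int) := by norm_num
      simp only [if_neg hcond]
      refine ⟨?_, ?_, ?_, ?_, ?_⟩
      · rw [h1, hci, hgetA, hnegi, hB1]
        norm_num
      · exact h2
      · intro j hj; exact h3 j (Nat.zero_le j)
      · intro h; omega
      · intro _
        refine ⟨?_, ?_, ?_⟩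
        · show B.1 + PySem.List.pyGetD (w1.map Prod.fst) ((0:Nat) : Int) 0
            = (A.1.getD 0 (0, 0)).1
          rw [hB1, hnegi, hA0]; ring
        · show B.2.1 + PySem.List.pyGetD (w1.map Prod.snd) ((0:Nat) : Int) 0
            = (A.1.getD 0 (0, 0)).2
          rw [hB2, hcnti, hA0]; ring
        · show (PySem.List.pyGetD c ((0:Nat) : Int) (0, 0)).1 = (c.getD 0 (0, 0)).1
          rw [hci]
    · have hipos : 0 < i := Nat.pos_of_ne_zero hi0
      obtain ⟨hb1, hb2, hb3⟩ := h5 hipos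
      have hcast : ((i : Int) - 1) = ((i - 1 : Nat) : Int) := by omega
      have hcondi : (0 : Int) < (i : Int) := by exact_mod_cast hipos
      unfold stepA stepB finA finB
      rw [hcast]
      simp only [if_pos hcondi, PySem.List.pySetD_natCast, PySem.List.pyGetD_natCast,
        getD_set_self A.1 i hilen]
      -- re-express the invariant hypotheses in getD form
      have hgetA' : A.1.getD i (0, 0) = w1.getD i (0, 0) := by
        rw [← PySem.List.pyGetD_natCast]; exact hgetA
      have hnegi' : (w1.map Prod.fst).getD i 0 = (w1.getD i (0, 0)).1 := by
        rw [← PySem.List.pyGetD_natCast (w1.map Prod.fst) i 0]; exact hnegi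
      have hcnti' : (w1.map Prod.snd).getD i 0 = (w1.getD i (0, 0)).2 := by
        rw [← PySem.List.pyGetD_natCast (w1.map Prod.snd) i 0]; exact hcnti
      rw [h1, hb1, hb2, hb3, hgetA', hnegi', hcnti']
      refine ⟨?_, ?_, ?_, ?_, ?_⟩
      · congr 1
        split_ifs with hcmp
        · rfl
        · ring
      · rw [List.length_set]; exact h2
      · intro j hj
        have hij : i ≠ j := by omega
        rw [getD_set_ne A.1 hij]
        exact h3 j (by omega)
      · intro h; omega
      · intro _
        have hsimp : i + 1 - 1 = i := rfl
        rw [hsimp, getD_set_self A.1 i hilen]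
        refine ⟨by ring, by ring, rfl⟩

theorem final_eq (sumv : Int) (m : Int) (c w1 : List (Int × Int)) (ans0 : List Int)
    (hlen : c.length = m.toNat) (hw : w1.length = m.toNat) :
    ((PySem.List.pyRange 0 m 1).foldl (finA sumv c) (w1, ans0)).2
      = ((PySem.List.enumerate c 0).foldl
          (finB sumv (w1.map Prod.fst) (w1.map Prod.snd)) (0, 0, 0, ans0)).2.2.2 := by
  have henum : PySem.List.enumerate c 0 = (PySem.List.pyRange 0 (PySem.List.len c) 1).map
      (fun j => (j, PySem.List.pyGetD c j (0, 0))) := PySem.List.enumerate_eq_map_pyRange c (0, 0)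
  rw [henum, List.foldl_map]
  by_cases hm : 0 ≤ m
  · have hmN : m = (c.length : Int) := by omega
    have hlc : PySem.List.len c = (c.length : Int) := rfl
    rw [hmN, hlc, PySem.List.pyRange_one 0 (c.length : Int)]
    have htN : (((c.length : Int)) - 0).toNat = c.length := by omega
    rw [htN]
    rw [List.foldl_map, List.foldl_map]
    have e1 : (fun (st : List (Int × Int) × List Int) (k : Nat) => finA sumv c st (0 + (k : Int)))
        = stepA sumv c := by
      funext st k; simp only [zero_add]; rfl
    have e2 : (fun (st : Int × Int × Int × List Int) (k : Nat) =>
          finB sumv (w1.map Prod.fst) (w1.map Prod.snd) st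
            ((0 + (k : Int)), PySem.List.pyGetD c (0 + (k : Int)) (0, 0)))
        = stepB sumv (w1.map Prod.fst) (w1.map Prod.snd) c := by
      funext st k; simp only [zero_add]; rfl
    rw [e1, e2]
    exact (final_inv sumv c w1 ans0 (by omega) c.length (le_refl _)).1
  · have h0 : PySem.List.pyRange 0 m 1 = [] := by
      rw [PySem.List.pyRange_one]
      have h00 : (m - 0).toNat = 0 := by omega
      rw [h00]; rfl
    have hc0 : c = [] := List.eq_nil_of_length_eq_zero (by omega)
    subst hc0
    have h1 : PySem.List.pyRange 0 (PySem.List.len ([] : List (Int × Int))) 1 = [] := by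
      rw [PySem.List.pyRange_one]; rfl
    rw [h0, h1]
    rfl

theorem solve_eq_alt (n m : Int) (a : List (Int × Int)) (b : List Int) :
    solve n m a b = solve_alt n m a b := by
  unfold solve solve_alt
  dsimp only
  set c := PySem.List.sorted2
      ((PySem.List.pyRange 0 m 1).map (fun i => (PySem.List.pyGetD b i 0, i)))
      (fun p : Int × Int => p.1) (fun p : Int × Int => p.2) true with hc
  set st := (PySem.List.pyRange 0 n 1).foldl
      (fun (st : Int × List (Int × Int)) i =>
        let sv := st.1 + (PySem.List.pyGetD a i (0, 0)).2
        (sv, st.2 ++ [((PySem.List.pyGetD a i (0, 0)).1, sv)]))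
      ((0 : Int), ([] : List (Int × Int))) with hst
  have hcp : c.Pairwise (fun p q : Int × Int => q.1 ≤ p.1) := by
    rw [hc]; exact sorted2_rev_pairwise_fst _
  have hclen : c.length = m.toNat := by
    rw [hc]
    rw [(PySem.List.sorted2_perm _ _ _ _).length_eq]
    rw [List.length_map, PySem.List.length_pyRange_one]
    omega
  have hbucket := bucket_eq m st.2 c hcp hclen (PySem.List.pyRange 0 (n - 1) 1)
    (List.replicate m.toNat ((0 : Int), (0 : Int)))
  have hrepf : (List.replicate m.toNat ((0 : Int), (0 : Int))).map Prod.fst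
      = List.replicate m.toNat (0 : Int) := by simp
  have hreps : (List.replicate m.toNat ((0 : Int), (0 : Int))).map Prod.snd
      = List.replicate m.toNat (0 : Int) := by simp
  rw [hrepf, hreps] at hbucket
  rw [hbucket]
  set W := (PySem.List.pyRange 0 (n - 1) 1).foldl
    (bodyA m st.2 c) (List.replicate m.toNat ((0 : Int), (0 : Int))) with hW
  have hWlen : W.length = m.toNat := by
    rw [hW, foldl_bodyA_length, List.length_replicate]
  exact final_eq st.1 m c W (List.replicate m.toNat 0) hclen hWlen

-- ===== VERDICT (by name: the statement is the Claim_ definition above) =====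
theorem solve_spec : Claim_equal_solve := by
  unfold Claim_equal_solve
  intro n m a b _ _
  unfold Spec_solve
  exact solve_eq_alt n m a b
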